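-- pv_equiv track=rewrite | github.com/GavinStrunk/prt-rl | src/prt_rl/common/collectors.py | _have_enough_trajectories
-- ===== SOURCE A (Python) =====
-- from typing import Dict, Optional, List, Tuple, Any
--
-- def _have_enough_trajectories(
--     target_trajectories: int,
--     num_envs: int,
--     episodes_completed_per_env: List[int]
-- ) -> bool:
--     """
--     Check if we have collected at least the target number of full trajectories.
--
--     Args:
--         target_trajectories: The target number of trajectories to collect.
--         num_envs: The number of parallel environments.
--         episodes_completed_per_env: List of completed episode counts per environment.
--
--     Returns:
--         True if we have collected enough trajectories, False otherwise.
--     """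
--     base_per_env = target_trajectories // num_envs
--     remainder = target_trajectories % num_envs
--
--     # Check if all envs have at least the base number of episodes
--     if any(count < base_per_env for count in episodes_completed_per_env):
--         return False
--
--     # If evenly divisible, we're done
--     if remainder == 0:
--         return True
--
--     # Need at least `remainder` envs with one extra episode
--     envs_with_extra = sum(1 for count in episodes_completed_per_env if count >= base_per_env + 1)
--     return envs_with_extra >= remainder
-- ===== SOURCE B (Python) =====
-- from typing import List
--
-- def _have_enough_trajectories(
--     target_trajectories: int,
--     num_envs: int,
--     episodes_completed_per_env: List[int]
-- ) -> bool:
--     base_per_env, remainder = divmod(target_trajectories, num_envs)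
--     # Sort once; the smallest count tells whether every env reached the floor,
--     # and the remainder-th largest count tells whether enough envs got an extra.
--     s = sorted(episodes_completed_per_env)
--     if s and s[0] < base_per_env:
--         return False
--     if remainder <= 0:
--         return True
--     if remainder > len(s):
--         return False
--     return s[len(s) - remainder] >= base_per_env + 1
-- ===== Notes on version B (the rewrite author's own statement) =====
-- stated objective: alternative
-- what changed: Replaces A's linear guard-and-count (all counts >= floor, then count envs above the floor vs the remainder) by a sort-based order-statistic check: sort the counts once, read the minimum s[0] for the floor guard and the remainder-th largest element s[len-remainder] for the surplus check.
import Mathlib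
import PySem

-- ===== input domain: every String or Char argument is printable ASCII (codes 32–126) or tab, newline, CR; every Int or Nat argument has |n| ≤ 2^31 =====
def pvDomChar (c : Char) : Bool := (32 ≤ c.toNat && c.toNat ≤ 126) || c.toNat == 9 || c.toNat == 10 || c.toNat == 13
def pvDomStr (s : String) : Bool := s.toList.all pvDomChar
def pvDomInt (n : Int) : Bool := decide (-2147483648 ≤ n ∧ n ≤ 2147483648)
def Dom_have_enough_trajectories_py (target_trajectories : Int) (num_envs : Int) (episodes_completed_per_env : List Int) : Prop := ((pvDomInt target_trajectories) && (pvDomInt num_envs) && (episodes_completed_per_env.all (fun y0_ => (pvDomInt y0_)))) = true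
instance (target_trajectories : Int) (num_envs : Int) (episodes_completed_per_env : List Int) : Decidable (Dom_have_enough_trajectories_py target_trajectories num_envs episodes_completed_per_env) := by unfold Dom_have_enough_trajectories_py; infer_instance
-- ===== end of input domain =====

-- B replaces A's linear guard-and-count by a sort-based order-statistic check:
-- sort once, read the minimum for the floor guard and the remainder-th largest
-- element for the surplus check (objective: alternative).

-- ===== PORT A =====
def have_enough_trajectories_py (target_trajectories : Int) (num_envs : Int) (episodes_completed_per_env : List Int) : Bool :=
  let base_per_env := PySem.Int.floordiv target_trajectories num_envs
  let remainder := PySem.Int.mod target_trajectories num_envs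
  if episodes_completed_per_env.any (fun count => count < base_per_env) then false
  else if remainder = 0 then true
  else
    let envs_with_extra :=
      episodes_completed_per_env.foldl (fun acc count => if count ≥ base_per_env + 1 then acc + 1 else acc) (0 : Int)
    envs_with_extra ≥ remainder

-- ===== PORT B =====
def have_enough_trajectories_py_alt (target_trajectories : Int) (num_envs : Int) (episodes_completed_per_env : List Int) : Bool :=
  let base_per_env := PySem.Int.floordiv target_trajectories num_envs
  let remainder := PySem.Int.mod target_trajectories num_envs
  let s := PySem.List.sorted episodes_completed_per_env (fun x => x) false
  -- `if s and s[0] < base_per_env` (s[0] only read when s is nonempty)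
  if !s.isEmpty && decide (s.headD 0 < base_per_env) then false
  else if remainder ≤ 0 then true
  else if remainder > (s.length : Int) then false
  else
    -- s[len(s) - remainder]; here 0 < remainder ≤ len s, so the index is in range
    match PySem.List.pyGet? s ((s.length : Int) - remainder) with
    | some v => decide (v ≥ base_per_env + 1)
    | none => false

-- ===== PRECONDITION & SPEC =====
-- Pre_ excludes only num_envs = 0, where A raises ZeroDivisionError.
def Pre_have_enough_trajectories_py (target_trajectories : Int) (num_envs : Int) (episodes_completed_per_env : List Int) : Prop := num_envs ≠ 0
instance (target_trajectories : Int) (num_envs : Int) (episodes_completed_per_env : List Int) : Decidable (Pre_have_enough_trajectories_py target_trajectories num_envs episodes_completed_per_env) := by unfold Pre_have_enough_trajectories_py; infer_instance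

def pvWitness_have_enough_trajectories_py : Int × Int × List Int := (5, 2, [3, 2])

def Spec_have_enough_trajectories_py (target_trajectories : Int) (num_envs : Int) (episodes_completed_per_env : List Int) (out : Bool) : Prop := out = have_enough_trajectories_py_alt target_trajectories num_envs episodes_completed_per_env
instance (target_trajectories : Int) (num_envs : Int) (episodes_completed_per_env : List Int) (out : Bool) : Decidable (Spec_have_enough_trajectories_py target_trajectories num_envs episodes_completed_per_env out) := by unfold Spec_have_enough_trajectories_py; infer_instance

-- ===== CLAIM (what is proved, stated in full; the proofs are below) =====
def Claim_equal_have_enough_trajectories_py : Prop := ∀ (target_trajectories : Int) (num_envs : Int) (episodes_completed_per_env : List Int), Dom_have_enough_trajectories_py target_trajectories num_envs episodes_completed_per_env → Pre_have_enough_trajectories_py target_trajectories num_envs episodes_completed_per_env → Spec_have_enough_trajectories_py target_trajectories num_envs episodes_completed_per_env (have_enough_trajectories_py target_trajectories num_envs episodes_completed_per_env)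

-- ===== LEMMAS AND PROOFS =====

-- A's counting fold is a countP.
lemma foldl_extra_eq_countP (base : Int) (xs : List Int) :
    xs.foldl (fun acc count => if count >= base + 1 then acc + 1 else acc) (0 : Int)
      = (xs.countP (fun count => decide (base + 1 <= count)) : Int) := by
  simpa [ge_iff_le] using PySem.List.foldl_ite_add_one (fun count => count >= base + 1) xs (0 : Int)

-- A's `any` guard read off the head of the sorted list.
lemma any_lt_eq_sorted_head (base : Int) (xs : List Int) :
    (xs.any (fun count => decide (count < base)))
      = (!(PySem.List.sorted xs (fun x => x) false).isEmpty
          && decide ((PySem.List.sorted xs (fun x => x) false).headD 0 < base)) := by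
  cases hs : PySem.List.sorted xs (fun x => x) false with
  | nil =>
    have hx : xs = [] := (PySem.List.sorted_eq_nil_iff xs (fun x => x) false).mp hs
    subst hx; simp
  | cons m t =>
    have hmin : ∀ y ∈ xs, m <= y := by
      intro y hy
      simpa using PySem.List.key_head_sorted_le (xs := xs) (key := fun x => x) hs y hy
    have hmem : m ∈ xs := by
      have : m ∈ PySem.List.sorted xs (fun x => x) false := by rw [hs]; simp
      exact (PySem.List.mem_sorted xs (fun x => x) false m).mp this
    simp only [List.isEmpty_cons, List.headD_cons, Bool.not_false, Bool.true_and]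
    by_cases h : m < base
    · simp only [h, decide_true]
      exact List.any_eq_true.mpr ⟨m, hmem, by simpa using h⟩
    · simp only [h, decide_false]
      refine List.any_eq_false.mpr ?_
      intro y hy
      simp only [decide_eq_true_eq]
      exact fun hlt => h (lt_of_le_of_lt (hmin y hy) hlt)

-- In a nondecreasing list, "at least k elements are >= v" iff the k-th largest is >= v.
lemma countP_ge_iff_orderstat (v : Int) : ∀ (s : List Int), s.Pairwise (· ≤ ·) →
    ∀ (k : Nat), 1 ≤ k → k ≤ s.length →
    (k ≤ s.countP (fun c => decide (v ≤ c)) ↔ v ≤ s.getD (s.length - k) 0) := by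
  intro s
  induction s with
  | nil =>
    intro _ k hk hk'
    simp only [List.length_nil, Nat.le_zero] at hk'
    exact absurd hk (by omega)
  | cons a s' ih =>
    intro hp k hk hk'
    have ha : ∀ b ∈ s', a ≤ b := (List.pairwise_cons.mp hp).1
    have hp' := (List.pairwise_cons.mp hp).2
    have hcle := List.countP_le_length (l := s') (p := fun c => decide (v ≤ c))
    rw [List.countP_cons]
    by_cases hle : k ≤ s'.length
    · have hidx : (a :: s').length - k = (s'.length - k) + 1 := by
        simp only [List.length_cons]; omega
      rw [hidx, List.getD_cons_succ]
      by_cases hva : v ≤ a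
      · have hall : s'.countP (fun c => decide (v ≤ c)) = s'.length :=
          List.countP_eq_length.mpr (fun b hb => by simpa using le_trans hva (ha b hb))
        have hmemidx : s'.length - k < s'.length := by omega
        have hR : v ≤ s'.getD (s'.length - k) 0 := by
          have hm : s'.getD (s'.length - k) 0 ∈ s' := by
            rw [List.getD_eq_getElem _ _ hmemidx]
            exact List.getElem_mem _
          exact le_trans hva (ha _ hm)
        refine iff_of_true ?_ hR
        simp only [hva, decide_true, if_true, hall]
        omega
      · have hz : (if decide (v ≤ a) then 1 else 0) = 0 := by simp [hva]
        rw [hz, Nat.add_zero]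
        exact ih hp' k hk hle
    · have hk2 : k = s'.length + 1 := by
        simp only [List.length_cons] at hk'; omega
      have hidx : (a :: s').length - k = 0 := by
        simp only [List.length_cons]; omega
      rw [hidx, List.getD_cons_zero]
      by_cases hva : v ≤ a
      · have hall : s'.countP (fun c => decide (v ≤ c)) = s'.length :=
          List.countP_eq_length.mpr (fun b hb => by simpa using le_trans hva (ha b hb))
        refine iff_of_true ?_ hva
        simp only [hva, decide_true, if_true, hall]
        omega
      · have hz : (if decide (v ≤ a) then 1 else 0) = 0 := by simp [hva]
        rw [hz, Nat.add_zero]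
        refine iff_of_false ?_ hva
        omega

-- ===== VERDICT (by name: the statement is the Claim_ definition above) =====
theorem have_enough_trajectories_py_spec : Claim_equal_have_enough_trajectories_py := by
  intro t n xs _ _
  unfold Spec_have_enough_trajectories_py have_enough_trajectories_py have_enough_trajectories_py_alt
  simp only []
  set base := PySem.Int.floordiv t n with hbase
  set rem := PySem.Int.mod t n with hrem
  set s := PySem.List.sorted xs (fun x => x) false with hs
  have hguard := any_lt_eq_sorted_head base xs
  rw [← hs] at hguard
  rw [← hguard]
  by_cases hany : (xs.any fun count => decide (count < base)) = true
  · rw [if_pos hany, if_pos hany]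
  · rw [if_neg hany, if_neg hany]
    have hperm : s.Perm xs := PySem.List.sorted_perm ..
    have hcnt : xs.countP (fun count => decide (base + 1 ≤ count))
        = s.countP (fun count => decide (base + 1 ≤ count)) := (hperm.countP_eq _).symm
    have hlen : s.length = xs.length := hperm.length_eq
    have hpw : s.Pairwise (· ≤ ·) := by
      have := PySem.List.sorted_pairwise (xs := xs) (key := fun x => x)
      simpa [← hs] using this
    by_cases hrem0 : rem = 0
    · rw [if_pos hrem0]
      rw [if_pos (by omega : rem ≤ 0)]
    · rw [if_neg hrem0]
      rw [foldl_extra_eq_countP, hcnt]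
      by_cases hremneg : rem ≤ 0
      · rw [if_pos hremneg]
        simp only [ge_iff_le, decide_eq_true_eq]
        omega
      · rw [if_neg hremneg]
        by_cases hbig : rem > (s.length : Int)
        · rw [if_pos hbig]
          have hle := List.countP_le_length (l := s) (p := fun count => decide (base + 1 ≤ count))
          simp only [ge_iff_le, decide_eq_false_iff_not, not_le]
          omega
        · rw [if_neg hbig]
          have hk1 : 1 ≤ rem.toNat := by omega
          have hk2 : rem.toNat ≤ s.length := by omega
          have hidx0 : (0:Int) ≤ (s.length : Int) - rem := by omega
          rw [PySem.List.pyGet?_eq_some_getElem s hidx0 (by omega)]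
          have hio := countP_ge_iff_orderstat (base + 1) s hpw rem.toNat hk1 hk2
          have hgetd : s.getD (s.length - rem.toNat) 0 = s[((s.length : Int) - rem).toNat] := by
            rw [List.getD_eq_getElem _ _ (by omega : s.length - rem.toNat < s.length)]
            congr 1
            omega
          rw [hgetd] at hio
          simp only [ge_iff_le, decide_eq_decide]
          constructor
          · intro h
            exact hio.mp (by omega)
          · intro h
            have := hio.mpr h
            omega
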